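-- pv_equiv track=rewrite | github.com/halexandru11/experimental-analysis-of-algorithms | h5/ex2_plots.py | _binary_search_with_cost
-- ===== SOURCE A (Python) =====
-- def _binary_search_with_cost(arr: list[int], x: int) -> tuple[bool, int]:
--     left = 0
--     right = len(arr) - 1
--     cost = 0
--
--     while left <= right:
--         mid = (left + right) // 2
--         cost += 1
--         if arr[mid] == x:
--             return True, cost
--         if arr[mid] < x:
--             left = mid + 1
--         else:
--             right = mid - 1
--
--     return False, cost
-- ===== SOURCE B (Python) =====
-- def _binary_search_with_cost(arr: list[int], x: int) -> tuple[bool, int]: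
--     # Recursive divide-and-conquer on (lo, size) instead of A's iterative (left, right) loop.
--     def go(lo: int, n: int, cost: int) -> tuple[bool, int]:
--         if n <= 0:
--             return False, cost
--         half = (n - 1) // 2
--         mid = lo + half
--         cost += 1
--         if arr[mid] == x:
--             return True, cost
--         if arr[mid] < x:
--             return go(mid + 1, n - half - 1, cost)
--         return go(lo, half, cost)
--
--     return go(0, len(arr), 0)
-- ===== Notes on version B (the rewrite author's own statement) =====
-- stated objective: alternative
-- what changed: Replaced the imperative while-loop over a (left, right) index pair with a recursive divide-and-conquer helper over a (lo, size) window, computing the midpoint as lo + (size-1)//2.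
import Mathlib
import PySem

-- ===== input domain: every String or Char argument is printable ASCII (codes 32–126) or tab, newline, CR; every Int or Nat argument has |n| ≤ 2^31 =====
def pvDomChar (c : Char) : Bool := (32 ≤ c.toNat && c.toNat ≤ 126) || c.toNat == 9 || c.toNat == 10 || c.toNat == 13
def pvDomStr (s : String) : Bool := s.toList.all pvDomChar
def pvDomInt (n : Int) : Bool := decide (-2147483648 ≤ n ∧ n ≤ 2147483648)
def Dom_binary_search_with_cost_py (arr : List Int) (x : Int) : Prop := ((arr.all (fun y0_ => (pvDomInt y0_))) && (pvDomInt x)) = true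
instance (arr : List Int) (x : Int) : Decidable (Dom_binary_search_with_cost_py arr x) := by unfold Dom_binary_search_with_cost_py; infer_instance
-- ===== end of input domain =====

-- B replaces A's while-loop over (left, right) with a recursive divide-and-conquer over a (lo, size) window; same results, same cost count (objective: alternative).

-- ===== PORT A =====
-- A's while-loop: state (left, right, cost); arr[mid] is always in range when the loop body runs, so pyGetD's default is never used.
def pyLoopA (arr : List Int) (x : Int) (left right cost : Int) : Bool × Int :=
  if _h : left ≤ right then
    let mid := PySem.Int.floordiv (left + right) 2
    let v := PySem.List.pyGetD arr mid 0
    if v == x then (true, cost + 1)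
    else if v < x then pyLoopA arr x (mid + 1) right (cost + 1)
    else pyLoopA arr x left (mid - 1) (cost + 1)
  else (false, cost)
termination_by (right + 1 - left).toNat
decreasing_by
  · have := PySem.Int.floordiv_two_mid_bounds (lo := left) (hi := right) _h
    omega
  · have := PySem.Int.floordiv_two_mid_bounds (lo := left) (hi := right) _h
    omega

def binary_search_with_cost_py (arr : List Int) (x : Int) : Bool × Int :=
  pyLoopA arr x 0 ((arr.length : Int) - 1) 0

-- ===== PORT B =====
-- B's recursive helper go(lo, n, cost) over a window of size n starting at lo.
def pyGoB (arr : List Int) (x : Int) (lo n cost : Int) : Bool × Int :=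
  if _h : n ≤ 0 then (false, cost)
  else
    let half := PySem.Int.floordiv (n - 1) 2
    let mid := lo + half
    let v := PySem.List.pyGetD arr mid 0
    if v == x then (true, cost + 1)
    else if v < x then pyGoB arr x (mid + 1) (n - half - 1) (cost + 1)
    else pyGoB arr x lo half (cost + 1)
termination_by n.toNat
decreasing_by
  · have := PySem.Int.floordiv_two_mid_bounds (lo := (0:Int)) (hi := n - 1) (by omega)
    simp only [zero_add] at this; omega
  · have := PySem.Int.floordiv_two_mid_bounds (lo := (0:Int)) (hi := n - 1) (by omega)
    simp only [zero_add] at this; omega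

def binary_search_with_cost_py_alt (arr : List Int) (x : Int) : Bool × Int :=
  pyGoB arr x 0 (arr.length : Int) 0

-- ===== PRECONDITION & SPEC =====
def Spec_binary_search_with_cost_py (arr : List Int) (x : Int) (out : Bool × Int) : Prop := out = binary_search_with_cost_py_alt arr x
instance (arr : List Int) (x : Int) (out : Bool × Int) : Decidable (Spec_binary_search_with_cost_py arr x out) := by unfold Spec_binary_search_with_cost_py; infer_instance

-- ===== CLAIM (what is proved, stated in full; the proofs are below) =====
def Claim_equal_binary_search_with_cost_py : Prop := ∀ (arr : List Int) (x : Int), Dom_binary_search_with_cost_py arr x → Spec_binary_search_with_cost_py arr x (binary_search_with_cost_py arr x)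

-- ===== LEMMAS AND PROOFS =====

-- A's loop on (left, right) equals B's recursion on (left, right + 1 - left): the two midpoints
-- coincide ((left+right)//2 = left + (right-left)//2) and the windows shrink in lock-step.
theorem pyLoopA_eq_pyGoB (arr : List Int) (x : Int) :
    ∀ (k : Nat) (left right cost : Int), (right + 1 - left).toNat ≤ k →
      pyLoopA arr x left right cost = pyGoB arr x left (right + 1 - left) cost := by
  intro k
  induction k with
  | zero =>
    intro left right cost hk
    rw [pyLoopA, pyGoB]
    rw [dif_neg (by omega), dif_pos (by omega)]
  | succ k ih =>
    intro left right cost hk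
    rw [pyLoopA, pyGoB]
    by_cases h : left ≤ right
    · rw [dif_pos h, dif_neg (by omega)]
      have hmid : PySem.Int.floordiv (left + right) 2
          = left + PySem.Int.floordiv (right + 1 - left - 1) 2 := by
        rw [PySem.Int.floordiv_eq_ediv_of_pos (by omega),
            PySem.Int.floordiv_eq_ediv_of_pos (by omega)]
        omega
      have hb := PySem.Int.floordiv_two_mid_bounds (lo := left) (hi := right) h
      simp only [← hmid]
      split
      · rfl
      · split
        · rw [ih _ _ _ (by omega)]
          congr 1
          rw [PySem.Int.floordiv_eq_ediv_of_pos (by omega)] at *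
          omega
        · rw [ih _ _ _ (by omega)]
          congr 1
          rw [PySem.Int.floordiv_eq_ediv_of_pos (by omega)] at *
          omega
    · rw [dif_neg h, dif_pos (by omega)]

-- ===== VERDICT (by name: the statement is the Claim_ definition above) =====
theorem binary_search_with_cost_py_spec : Claim_equal_binary_search_with_cost_py := by
  intro arr x _
  unfold Spec_binary_search_with_cost_py binary_search_with_cost_py binary_search_with_cost_py_alt
  have := pyLoopA_eq_pyGoB arr x ((arr.length : Int) - 1 + 1 - 0).toNat 0 ((arr.length : Int) - 1) 0 (le_refl _)
  simpa using this
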